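-- pv_equiv track=rewrite | github.com/Met2348/abr | scripts/phase_f_implicit_prm_eval.py | _split_steps
-- ===== SOURCE A (Python) =====
-- def _split_steps(text: str) -> list[str]:
--     """Split solution into cumulative prefixes at double-newline boundaries."""
--     parts = [p.strip() for p in text.split("\n\n") if p.strip()]
--     prefixes: list[str] = []
--     running = ""
--     for part in parts:
--         running = (running + "\n\n" + part).strip() if running else part
--         prefixes.append(running)
--     return prefixes
-- ===== SOURCE B (Python) =====
-- def _split_steps(text: str) -> list[str]:
--     parts = [p.strip() for p in text.split("\n\n") if p.strip()]
--     return ["\n\n".join(parts[:i + 1]) for i in range(len(parts))]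
-- ===== Notes on version B (the rewrite author's own statement) =====
-- stated objective: simpler
-- what changed: Replaces the accumulator-threading loop (a running string rebuilt and re-stripped each step) with a direct comprehension computing each prefix as the double-newline join of a slice of the already-stripped parts.
import Mathlib
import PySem

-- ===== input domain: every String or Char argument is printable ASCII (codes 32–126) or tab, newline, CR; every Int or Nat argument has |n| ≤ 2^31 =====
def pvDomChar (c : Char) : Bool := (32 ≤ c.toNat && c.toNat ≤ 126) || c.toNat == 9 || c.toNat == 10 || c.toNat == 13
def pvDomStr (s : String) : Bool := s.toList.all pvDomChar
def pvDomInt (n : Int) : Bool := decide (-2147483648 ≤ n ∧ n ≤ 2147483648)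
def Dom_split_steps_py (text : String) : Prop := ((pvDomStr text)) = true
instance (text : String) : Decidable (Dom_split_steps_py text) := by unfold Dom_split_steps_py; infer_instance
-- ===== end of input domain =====

-- B replaces A's running-accumulator loop with a direct join-of-prefix-slice comprehension (objective: simpler; same cost).

-- the "\n\n" separator, shared by both ports (it is the same literal in both Pythons)
def pvNN : List Char := ['\n', '\n']

-- parts = [p.strip() for p in text.split("\n\n") if p.strip()]  (the identical first line of both Pythons)
def pvParts (text : String) : List (List Char) :=
  ((PySem.Chars.splitOn text.toList pvNN).filter
      (fun p => !(PySem.Chars.strip p).isEmpty)).map PySem.Chars.strip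

-- ===== PORT A =====
-- loop body of A: running = (running + "\n\n" + part).strip() if running else part; prefixes.append(running)
def pvStepA (st : List (List Char) × List Char) (part : List Char) : List (List Char) × List Char :=
  let running := if st.2.isEmpty then part else PySem.Chars.strip (st.2 ++ pvNN ++ part)
  (st.1 ++ [running], running)

def split_steps_py (text : String) : List String :=
  (((pvParts text).foldl pvStepA ([], [])).1).map String.ofList

-- ===== PORT B =====
def split_steps_py_alt (text : String) : List String :=
  -- ["\n\n".join(parts[:i + 1]) for i in range(len(parts))]
  (List.range (pvParts text).length).map
    (fun i => String.ofList (PySem.Chars.join pvNN ((pvParts text).take (i + 1))))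

-- ===== PRECONDITION & SPEC =====
def Spec_split_steps_py (text : String) (out : List String) : Prop := out = split_steps_py_alt text
instance (text : String) (out : List String) : Decidable (Spec_split_steps_py text out) := by unfold Spec_split_steps_py; infer_instance

-- ===== CLAIM (what is proved, stated in full; the proofs are below) =====
def Claim_equal_split_steps_py : Prop := ∀ (text : String), Dom_split_steps_py text → Spec_split_steps_py text (split_steps_py text)

-- ===== LEMMAS AND PROOFS =====

-- a char list is "good" when it is nonempty and neither end is whitespace (the shape of every stripped nonempty part)
def pvGood (l : List Char) : Prop :=
  (∃ a, l.head? = some a ∧ PySem.Chars.isspace a = false) ∧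
  (∃ b, l.getLast? = some b ∧ PySem.Chars.isspace b = false)

theorem pvGood_ne_nil {l : List Char} (h : pvGood l) : l ≠ [] := by
  obtain ⟨⟨a, ha, _⟩, _⟩ := h
  intro hl; subst hl; simp at ha

theorem pv_head?_dropWhile {p : Char → Bool} {l : List Char} {a : Char}
    (h : (l.dropWhile p).head? = some a) : p a = false := by
  induction l with
  | nil => simp at h
  | cons x t ih =>
    by_cases hx : p x <;> simp [List.dropWhile, hx] at h
    · exact ih h
    · subst h; simp_all

theorem pv_dropWhile_eq_self {p : Char → Bool} {l : List Char} {a : Char}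
    (ha : l.head? = some a) (hs : p a = false) : l.dropWhile p = l := by
  cases l with
  | nil => rfl
  | cons x t =>
    simp at ha
    simp [List.dropWhile, ha ▸ hs]

theorem pv_lstrip_eq_self {l : List Char} (h : ∃ a, l.head? = some a ∧ PySem.Chars.isspace a = false) :
    PySem.Chars.lstrip l = l := by
  obtain ⟨a, ha, hs⟩ := h
  simpa [PySem.Chars.lstrip] using pv_dropWhile_eq_self ha hs

theorem pv_rstrip_eq_self {l : List Char} (h : ∃ b, l.getLast? = some b ∧ PySem.Chars.isspace b = false) :
    PySem.Chars.rstrip l = l := by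
  obtain ⟨b, hb, hs⟩ := h
  have hh : l.reverse.head? = some b := by rw [List.head?_reverse]; exact hb
  simp [PySem.Chars.rstrip, pv_dropWhile_eq_self hh hs]

theorem pv_strip_eq_self {l : List Char} (h : pvGood l) : PySem.Chars.strip l = l := by
  simp [PySem.Chars.strip, pv_lstrip_eq_self h.1, pv_rstrip_eq_self h.2]

theorem pvGood_append {r p : List Char} (m : List Char) (hr : pvGood r) (hp : pvGood p) :
    pvGood (r ++ m ++ p) := by
  obtain ⟨⟨a, ha, hsa⟩, _⟩ := hr
  obtain ⟨_, ⟨b, hb, hsb⟩⟩ := hp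
  constructor
  · exact ⟨a, by rw [List.append_assoc, List.head?_append, ha]; rfl, hsa⟩
  · refine ⟨b, ?_, hsb⟩
    rw [List.getLast?_append, hb]; rfl

-- a nonempty stripped string is good
theorem pvGood_strip {q : List Char} (h : PySem.Chars.strip q ≠ []) : pvGood (PySem.Chars.strip q) := by
  have hdef : PySem.Chars.strip q
      = ((PySem.Chars.lstrip q).reverse.dropWhile PySem.Chars.isspace).reverse := rfl
  constructor
  · -- head of strip q = head of lstrip q, which dropWhile made non-space
    have hsuf : ((PySem.Chars.lstrip q).reverse.dropWhile PySem.Chars.isspace) <:+ (PySem.Chars.lstrip q).reverse :=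
      List.dropWhile_suffix _
    have hpre : PySem.Chars.strip q <+: PySem.Chars.lstrip q := by
      rw [hdef]
      have := List.reverse_prefix.mpr hsuf
      simpa using this
    obtain ⟨t, ht⟩ := hpre
    obtain ⟨c, cs, hc⟩ := List.exists_cons_of_ne_nil h
    have hhead : (PySem.Chars.lstrip q).head? = some c := by
      rw [← ht, hc]; rfl
    have hl : PySem.Chars.lstrip q = q.dropWhile PySem.Chars.isspace := rfl
    refine ⟨c, by rw [hc]; rfl, ?_⟩
    exact pv_head?_dropWhile (hl ▸ hhead)
  · -- last of strip q = head of the reversed dropWhile, non-space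
    have hne : ((PySem.Chars.lstrip q).reverse.dropWhile PySem.Chars.isspace) ≠ [] := by
      intro h0; apply h; rw [hdef, h0]; rfl
    obtain ⟨b, bs, hb⟩ := List.exists_cons_of_ne_nil hne
    refine ⟨b, ?_, pv_head?_dropWhile (l := (PySem.Chars.lstrip q).reverse) (by rw [hb]; rfl)⟩
    rw [hdef, List.getLast?_reverse, hb]; rfl

theorem pv_join_cons (x y : List Char) (l : List (List Char)) :
    PySem.Chars.join pvNN (x :: y :: l) = x ++ pvNN ++ PySem.Chars.join pvNN (y :: l) := by
  simp [PySem.Chars.join, List.intercalate, List.intersperse]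

theorem pv_join_cons_ne {x : List Char} {l : List (List Char)} (h : l ≠ []) :
    PySem.Chars.join pvNN (x :: l) = x ++ pvNN ++ PySem.Chars.join pvNN l := by
  cases l with
  | nil => exact absurd rfl h
  | cons y t => exact pv_join_cons x y t

-- the loop invariant: from a good running value r, A's fold appends exactly the slice-joins seeded with r
theorem pv_loopA (parts : List (List Char)) (hp : ∀ p ∈ parts, pvGood p)
    (acc : List (List Char)) (r : List Char) (hr : pvGood r) :
    (parts.foldl pvStepA (acc, r)).1
      = acc ++ (List.range parts.length).map
          (fun i => r ++ pvNN ++ PySem.Chars.join pvNN (parts.take (i + 1))) := by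
  induction parts generalizing acc r with
  | nil => simp
  | cons p rest ih =>
    have hpg : pvGood p := hp p (by simp)
    have hrest : ∀ q ∈ rest, pvGood q := fun q hq => hp q (by simp [hq])
    have hrne : r.isEmpty = false := by
      simp only [List.isEmpty_eq_false_iff]; exact pvGood_ne_nil hr
    have hr' : pvGood (r ++ pvNN ++ p) := pvGood_append pvNN hr hpg
    have hstrip : PySem.Chars.strip (r ++ (pvNN ++ p)) = r ++ (pvNN ++ p) := by
      have := pv_strip_eq_self hr'
      simpa [List.append_assoc] using this
    have hstep : pvStepA (acc, r) p = (acc ++ [r ++ pvNN ++ p], r ++ pvNN ++ p) := by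
      simp [pvStepA, hrne, hstrip]
    rw [List.foldl_cons, hstep, ih hrest _ _ hr']
    rw [List.length_cons, List.range_succ_eq_map]
    rw [List.append_assoc]
    simp only [List.singleton_append, List.map_cons, List.map_map]
    congr 1
    congr 1
    · simp
    apply List.map_congr_left
    intro i hi
    have hlt : i < rest.length := List.mem_range.mp hi
    have htake : rest.take (i + 1) ≠ [] := by
      have hne : rest ≠ [] := by intro h0; subst h0; simp at hlt
      simp [List.take_eq_nil_iff, hne]
    simp only [Function.comp_apply]
    rw [List.take_succ_cons, pv_join_cons_ne htake]
    simp [List.append_assoc]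

theorem pv_parts_good (text : String) : ∀ q ∈ pvParts text, pvGood q := by
  intro q hq
  simp only [pvParts, List.mem_map, List.mem_filter] at hq
  obtain ⟨p, ⟨_, hne⟩, hq⟩ := hq
  subst hq
  apply pvGood_strip
  simpa [List.isEmpty_iff] using hne

-- ===== VERDICT (by name: the statement is the Claim_ definition above) =====
theorem split_steps_py_spec : Claim_equal_split_steps_py := by
  intro text _
  unfold Spec_split_steps_py split_steps_py split_steps_py_alt
  have hgood := pv_parts_good text
  generalize pvParts text = parts at hgood ⊢
  cases parts with
  | nil => rfl
  | cons p rest =>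
    have hpg : pvGood p := hgood p (by simp)
    have hrest : ∀ q ∈ rest, pvGood q := fun q hq => hgood q (by simp [hq])
    have hstep0 : pvStepA ([], []) p = ([p], p) := by simp [pvStepA]
    rw [List.foldl_cons, hstep0, pv_loopA rest hrest [p] p hpg]
    rw [List.length_cons, List.range_succ_eq_map]
    simp only [List.map_cons, List.map_map, List.singleton_append]
    congr 1
    · simp
    apply List.map_congr_left
    intro i hi
    have hlt : i < rest.length := List.mem_range.mp hi
    have htake : rest.take (i + 1) ≠ [] := by
      have hne : rest ≠ [] := by intro h0; subst h0; simp at hlt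
      simp [List.take_eq_nil_iff, hne]
    simp [Function.comp_apply, List.take_succ_cons, pv_join_cons_ne htake, List.append_assoc]
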